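-- pv_equiv track=rewrite | github.com/itslevictor/quero-ser | exercicios/criptografia_navio/criptografia_navio.py | processa_lista1
-- ===== SOURCE A (Python) =====
-- def processa_lista1(lista):
--     lista_ordenada = []
--     penultimo=""
--     ultimo = ""
--     contador=0
--     contador2=1
--     for item in lista:
--         contador2+=1
--         lista_ordenada.append(item)
--         contador+=1
--         if(contador == 8):
--             ultimo = lista_ordenada[len(lista_ordenada)-1]
--             penultimo= lista_ordenada[len(lista_ordenada)-2]
--             lista_ordenada[len(lista_ordenada)-1] = penultimo
--             lista_ordenada[len(lista_ordenada)-2] = ultimo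
--             #aletracao
--             contador = 0
--     return lista_ordenada
-- ===== SOURCE B (Python) =====
-- def processa_lista1(lista):
--     out = []
--     i = 0
--     while i + 8 <= len(lista):
--         bloco = lista[i:i+8]
--         out += bloco[:6] + [bloco[7], bloco[6]]
--         i += 8
--     return out + lista[i:]
-- ===== Notes on version B (the rewrite author's own statement) =====
-- stated objective: alternative
-- what changed: A's element-by-element append loop with a running reset counter and an in-place swap of the last two appended items is replaced by an index-striding while-loop over whole 8-blocks taken with slices (emit bloco[:6] + [bloco[7], bloco[6]] per complete block, copy the partial tail unchanged).
import Mathlib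
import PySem

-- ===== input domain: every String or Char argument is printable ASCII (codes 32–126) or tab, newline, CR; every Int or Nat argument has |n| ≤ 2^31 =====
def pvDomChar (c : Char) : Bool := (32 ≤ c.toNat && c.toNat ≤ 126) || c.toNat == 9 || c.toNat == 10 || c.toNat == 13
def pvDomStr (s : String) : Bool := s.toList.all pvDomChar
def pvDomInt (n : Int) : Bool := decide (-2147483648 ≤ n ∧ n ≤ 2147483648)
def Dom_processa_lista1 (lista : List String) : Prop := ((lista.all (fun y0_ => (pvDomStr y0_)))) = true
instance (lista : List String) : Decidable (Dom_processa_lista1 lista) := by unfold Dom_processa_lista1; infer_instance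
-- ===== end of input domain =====

-- B replaces A's element-by-element append loop with a running reset counter by an
-- index-striding loop over whole 8-blocks built with slices (alternative decomposition,
-- same O(n) cost); neither implementation mutates the input list.


-- ===== PORT A =====
-- the for-loop, carrying exactly A's state (lista_ordenada, penultimo, ultimo, contador, contador2);
-- the Python indices len-1/len-2 and the two assignments are always in range here (contador = 8 items
-- were just appended), so the total forms pyGet?/getD "" and pySetD are exact
def pvLoopA (acc : List String) (pen ult : String) (cont cont2 : Nat) : List String → List String
  | [] => acc
  | item :: rest =>
    let cont2' := cont2 + 1
    let acc' := acc ++ [item]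
    let cont' := cont + 1
    if cont' = 8 then
      let ult' := (PySem.List.pyGet? acc' ((acc'.length : Int) - 1)).getD ""
      let pen' := (PySem.List.pyGet? acc' ((acc'.length : Int) - 2)).getD ""
      let acc'' := PySem.List.pySetD (PySem.List.pySetD acc' ((acc'.length : Int) - 1) pen')
                     ((acc'.length : Int) - 2) ult'
      pvLoopA acc'' pen' ult' 0 cont2' rest
    else
      pvLoopA acc' pen ult cont' cont2' rest

def processa_lista1 (lista : List String) : List String :=
  pvLoopA [] "" "" 0 1 lista

-- ===== PORT B =====
-- B's while-loop (i is Python's non-negative index, kept as Nat);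
-- bloco[7]/bloco[6] are always in range (bloco has exactly 8 elements there), so pyGet?/getD "" is exact
def pvLoopB (lista out : List String) (i : Nat) : List String :=
  if i + 8 ≤ lista.length then
    let bloco := PySem.List.slice lista (some (i : Int)) (some ((i : Int) + 8))
    pvLoopB lista
      (out ++ (PySem.List.slice bloco none (some 6) ++
        [(PySem.List.pyGet? bloco 7).getD "", (PySem.List.pyGet? bloco 6).getD ""]))
      (i + 8)
  else
    out ++ PySem.List.slice lista (some (i : Int)) none
termination_by lista.length - i

def processa_lista1_alt (lista : List String) : List String :=
  pvLoopB lista [] 0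

-- ===== PRECONDITION & SPEC =====
def Spec_processa_lista1 (lista : List String) (out : List String) : Prop := out = processa_lista1_alt lista
instance (lista : List String) (out : List String) : Decidable (Spec_processa_lista1 lista out) := by unfold Spec_processa_lista1; infer_instance

-- ===== CLAIM (what is proved, stated in full; the proofs are below) =====
def Claim_equal_processa_lista1 : Prop := ∀ (lista : List String), Dom_processa_lista1 lista → Spec_processa_lista1 lista (processa_lista1 lista)

-- ===== LEMMAS AND PROOFS =====

-- the common specification both loops are reduced to: swap the last two of every complete 8-block
def pvChunks : List String → List String
  | a :: b :: c :: d :: e :: f :: g :: h :: rest => [a, b, c, d, e, f, h, g] ++ pvChunks rest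
  | l => l

lemma pvChunks_short (l : List String) (h : l.length < 8) : pvChunks l = l := by
  rcases l with _|⟨a, _|⟨b, _|⟨c, _|⟨d, _|⟨e, _|⟨f, _|⟨g, _|⟨x, rest⟩⟩⟩⟩⟩⟩⟩⟩ <;>
    first | rfl | (simp at h; try omega)

-- A's swap of the last two elements of the accumulated list, applied to acc ++ a full 8-block
lemma pvSwapStep (acc : List String) (a b c d e f g x : String) :
    (PySem.List.pySetD
      (PySem.List.pySetD (acc ++ [a,b,c,d,e,f,g,x])
        (((acc ++ [a,b,c,d,e,f,g,x]).length : Int) - 1)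
        ((PySem.List.pyGet? (acc ++ [a,b,c,d,e,f,g,x])
          (((acc ++ [a,b,c,d,e,f,g,x]).length : Int) - 2)).getD ""))
      (((acc ++ [a,b,c,d,e,f,g,x]).length : Int) - 2)
      ((PySem.List.pyGet? (acc ++ [a,b,c,d,e,f,g,x])
        (((acc ++ [a,b,c,d,e,f,g,x]).length : Int) - 1)).getD ""))
    = acc ++ [a,b,c,d,e,f,x,g] := by
  have hlen : ((acc ++ [a,b,c,d,e,f,g,x]).length : Int) = ((acc.length : Int) + 8) := by simp
  have h1 : (acc.length : Int) + 8 - 1 = ((acc.length + 7 : Nat) : Int) := by push_cast; ring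
  have h2 : (acc.length : Int) + 8 - 2 = ((acc.length + 6 : Nat) : Int) := by push_cast; ring
  rw [hlen, h1, h2, PySem.List.pyGet?_natCast, PySem.List.pyGet?_natCast,
      PySem.List.pySetD_natCast, PySem.List.pySetD_natCast]
  simp

-- A's loop invariant: with `part` the current partial block (fewer than 8 items) already
-- appended and contador = part.length, the loop produces acc ++ pvChunks (part ++ l)
lemma pvLoopA_eq (l : List String) : ∀ (part acc : List String) (p u : String) (c2 : Nat),
    part.length < 8 →
    pvLoopA (acc ++ part) p u part.length c2 l = acc ++ pvChunks (part ++ l) := by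
  induction l with
  | nil =>
    intro part acc p u c2 hlen
    simp [pvLoopA, pvChunks_short part hlen]
  | cons x xs ih =>
    intro part acc p u c2 hlen
    by_cases h8 : part.length + 1 = 8
    · have hl7 : part.length = 7 := by omega
      rcases part with _|⟨a, _|⟨b, _|⟨c, _|⟨d, _|⟨e, _|⟨f, _|⟨g, rest⟩⟩⟩⟩⟩⟩⟩ <;> simp at hl7
      subst hl7
      rw [pvLoopA]
      simp only [List.length_cons]
      rw [if_pos (by norm_num)]
      have happ : (acc ++ [a,b,c,d,e,f,g]) ++ [x] = acc ++ [a,b,c,d,e,f,g,x] := by simp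
      rw [happ, pvSwapStep]
      have hih := ih [] (acc ++ [a,b,c,d,e,f,x,g])
        ((PySem.List.pyGet? (acc ++ [a,b,c,d,e,f,g,x])
          (((acc ++ [a,b,c,d,e,f,g,x]).length : Int) - 2)).getD "")
        ((PySem.List.pyGet? (acc ++ [a,b,c,d,e,f,g,x])
          (((acc ++ [a,b,c,d,e,f,g,x]).length : Int) - 1)).getD "") (c2+1) (by simp)
      simp only [List.append_nil, List.nil_append, List.length_nil] at hih
      rw [hih]
      show _ = acc ++ pvChunks (a :: b :: c :: d :: e :: f :: g :: x :: xs)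
      rw [pvChunks, ← List.append_assoc]
    · rw [pvLoopA]
      rw [if_neg h8]
      have hih := ih (part ++ [x]) acc p u (c2+1) (by simp; omega)
      simp only [List.length_append, List.length_cons, List.length_nil] at hih
      rw [List.append_assoc] at hih ⊢
      simpa using hih

-- B's loop invariant: from index i the loop appends pvChunks of the remaining suffix
lemma pvLoopB_eq (m : Nat) : ∀ (lista out : List String) (i : Nat), lista.length - i = m →
    pvLoopB lista out i = out ++ pvChunks (lista.drop i) := by
  induction m using Nat.strong_induction_on with
  | _ m ihm =>
    intro lista out i hm
    rw [pvLoopB]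
    by_cases h8 : i + 8 ≤ lista.length
    · rw [if_pos h8]
      have hlen : 8 ≤ (lista.drop i).length := by simp; omega
      rcases hd : lista.drop i with _|⟨a, _|⟨b, _|⟨c, _|⟨d, _|⟨e, _|⟨f, _|⟨g, _|⟨x, rest⟩⟩⟩⟩⟩⟩⟩⟩ <;>
        (try (rw [hd] at hlen; simp at hlen))
      have hcast : ((i : Int) + 8) = ((i : Int) + ((8 : Nat) : Int)) := by push_cast; ring
      have hsl : PySem.List.slice lista (some (i : Int)) (some ((i : Int) + 8))
          = [a,b,c,d,e,f,g,x] := by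
        rw [hcast, PySem.List.slice_natCast_add, hd]
        rfl
      rw [hsl]
      have hdrop : lista.drop (i + 8) = rest := by
        rw [← List.drop_drop, hd]
        rfl
      have hih := ihm (lista.length - (i + 8)) (by omega) lista
        (out ++ (PySem.List.slice [a,b,c,d,e,f,g,x] none (some 6) ++
          [(PySem.List.pyGet? [a,b,c,d,e,f,g,x] 7).getD "",
           (PySem.List.pyGet? [a,b,c,d,e,f,g,x] 6).getD ""])) (i + 8) rfl
      rw [hih, hdrop]
      conv_rhs => rw [pvChunks]
      rw [List.append_assoc]
      rfl
    · rw [if_neg h8]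
      rw [PySem.List.slice_from_natCast]
      rw [pvChunks_short (lista.drop i) (by simp; omega)]

-- ===== VERDICT (by name: the statement is the Claim_ definition above) =====
theorem processa_lista1_spec : Claim_equal_processa_lista1 := by
  intro lista _
  unfold Spec_processa_lista1 processa_lista1 processa_lista1_alt
  have hA := pvLoopA_eq lista [] [] "" "" 1 (by simp)
  have hB := pvLoopB_eq (lista.length - 0) lista [] 0 rfl
  simp only [List.nil_append, List.append_nil, List.length_nil, List.drop_zero] at hA hB
  rw [hA, hB]
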